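-- pv_equiv track=rewrite | github.com/toniale/DSC80 | labs/lab01.py | same_diff_ints
-- ===== SOURCE A (Python) =====
-- def same_diff_ints(ints):
--     """
--     same_diff_ints tests whether a list contains
--     two list elements i places apart, whose distance
--     as integers is also i.
--     :param ints: a list of integers
--     :returns: a boolean value if ints contains two
--     elements as described above.
--     :Example:
--     >>> same_diff_ints([5,3,1,5,9,8])
--     True
--     >>> same_diff_ints([1,3,5,7,9])
--     False
--     """
--     lst_length = len(ints)
--     for i in range(lst_length):
--         for j in range(i + 1, lst_length):
--             num_difference = abs(ints[i] - ints[j])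
--             space_difference = j - i
--             if space_difference == abs(ints[i] - ints[j]):
--                 return True
--     return False
-- ===== SOURCE B (Python) =====
-- def same_diff_ints(ints):
--     # pair (i,j), i<j, with j-i == abs(a[i]-a[j])  <=>  a duplicate among v-k or among v+k
--     minus = [v - k for k, v in enumerate(ints)]
--     plus = [v + k for k, v in enumerate(ints)]
--     return len(set(minus)) < len(minus) or len(set(plus)) < len(plus)
-- ===== Notes on version B (the rewrite author's own statement) =====
-- stated objective: faster
-- what changed: Replaced the O(n^2) scan over all index pairs by the algebraic equivalence j-i == abs(a[i]-a[j]) iff a[i]-i or a[i]+i repeats, checked with two linear set-based duplicate tests.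
import Mathlib
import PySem

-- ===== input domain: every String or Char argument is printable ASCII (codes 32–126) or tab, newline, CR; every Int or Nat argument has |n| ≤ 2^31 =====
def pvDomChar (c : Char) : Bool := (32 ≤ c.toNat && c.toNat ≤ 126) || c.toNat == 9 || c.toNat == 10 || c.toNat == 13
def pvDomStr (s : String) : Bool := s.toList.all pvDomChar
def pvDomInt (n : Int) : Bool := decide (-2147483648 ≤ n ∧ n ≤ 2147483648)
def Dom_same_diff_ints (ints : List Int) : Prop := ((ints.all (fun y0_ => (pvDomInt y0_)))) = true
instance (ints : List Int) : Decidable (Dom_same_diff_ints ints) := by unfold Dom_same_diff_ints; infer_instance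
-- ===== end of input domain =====

-- B replaces A's quadratic scan over all index pairs by two linear duplicate tests
-- (a qualifying pair exists iff some v-k or some v+k value repeats); measured faster.

-- ===== PORT A =====
def same_diff_ints (ints : List Int) : Bool :=
  let lst_length : Int := ints.length
  (PySem.List.pyRange 0 lst_length 1).any fun i =>
    (PySem.List.pyRange (i + 1) lst_length 1).any fun j =>
      let _num_difference := |PySem.List.pyGetD ints i 0 - PySem.List.pyGetD ints j 0|
      let space_difference := j - i
      decide (space_difference = |PySem.List.pyGetD ints i 0 - PySem.List.pyGetD ints j 0|)

-- ===== PORT B =====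
def same_diff_ints_alt (ints : List Int) : Bool :=
  let minus := (PySem.List.enumerate ints).map (fun p => p.2 - p.1)
  let plus := (PySem.List.enumerate ints).map (fun p => p.2 + p.1)
  decide ((PySem.Set.ofList minus).length < minus.length) ||
  decide ((PySem.Set.ofList plus).length < plus.length)

-- ===== PRECONDITION & SPEC =====
def Spec_same_diff_ints (ints : List Int) (out : Bool) : Prop := out = same_diff_ints_alt ints
instance (ints : List Int) (out : Bool) : Decidable (Spec_same_diff_ints ints out) := by unfold Spec_same_diff_ints; infer_instance

-- ===== CLAIM (what is proved, stated in full; the proofs are below) =====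
def Claim_equal_same_diff_ints : Prop := ∀ (ints : List Int), Dom_same_diff_ints ints → Spec_same_diff_ints ints (same_diff_ints ints)

-- ===== LEMMAS AND PROOFS =====

lemma discard_len_lt {α : Type} [BEq α] [LawfulBEq α] (s : List α) (x : α) (hx : x ∈ s) :
    (PySem.Set.discard s x).length < s.length := by
  unfold PySem.Set.discard
  apply List.length_filter_lt_length_iff_exists.mpr
  exact ⟨x, hx, by simp⟩

lemma discard_len_le {α : Type} [BEq α] (s : List α) (x : α) :
    (PySem.Set.discard s x).length ≤ s.length := by
  unfold PySem.Set.discard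
  exact List.length_filter_le _ _

-- len(set(l)) < len(l) exactly when l has a duplicate
lemma ofList_length_lt_iff {α : Type} [BEq α] [LawfulBEq α] (l : List α) :
    (PySem.Set.ofList l).length < l.length ↔ ¬ l.Nodup := by
  constructor
  · intro h hn
    rw [PySem.Set.ofList_eq_self_of_nodup l hn] at h
    omega
  · intro hn
    induction l with
    | nil => simp at hn
    | cons x xs ih =>
      rw [PySem.Set.ofList_cons]
      simp only [List.length_cons]
      by_cases hx : x ∈ xs
      · have hmem : x ∈ PySem.Set.ofList xs := (PySem.Set.mem_ofList xs x).mpr hx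
        have h1 := discard_len_lt (PySem.Set.ofList xs) x hmem
        have h2 := PySem.Set.length_ofList_le xs
        omega
      · have hn' : ¬ xs.Nodup := fun h2 => hn (List.nodup_cons.mpr ⟨hx, h2⟩)
        have h1 := discard_len_le (PySem.Set.ofList xs) x
        have := ih hn'
        omega

-- a duplicate is a pair of equal elements at positions i < j
lemma not_nodup_iff_exists {α : Type} [DecidableEq α] (l : List α) :
    ¬ l.Nodup ↔ ∃ i j : Nat, ∃ hj : j < l.length, ∃ hij : i < j, l[i]'(hij.trans hj) = l[j] := by
  rw [List.Nodup, List.pairwise_iff_getElem]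
  push Not
  constructor
  · rintro ⟨i, j, hi, hj, hij, h⟩
    exact ⟨i, j, hj, hij, h⟩
  · rintro ⟨i, j, hj, hij, h⟩
    exact ⟨i, j, hij.trans hj, hj, hij, h⟩

-- k-th element of the mapped enumerate comprehension
lemma getElem_map_enumerate {α β : Type} (f : Int × α → β) (xs : List α) (s : Int)
    (k : Nat) (hk : k < xs.length)
    (hk' : k < ((PySem.List.enumerate xs s).map f).length) :
    ((PySem.List.enumerate xs s).map f)[k] = f (s + k, xs[k]) := by
  induction xs generalizing s k with
  | nil => simp at hk
  | cons x xs ih =>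
    simp only [PySem.List.enumerate_cons, List.map_cons]
    cases k with
    | zero => simp
    | succ n =>
      simp only [List.getElem_cons_succ]
      rw [ih (s+1) n (by simpa using hk) (by simpa using hk)]
      have : s + 1 + (n : Int) = s + (n + 1 : Nat) := by push_cast; ring
      rw [this]

-- A's nested loop as an existential over index pairs
lemma same_diff_ints_eq_true_iff (ints : List Int) :
    same_diff_ints ints = true ↔
      ∃ i j : Nat, ∃ hj : j < ints.length, ∃ hij : i < j,
        ((j : Int) - i = |ints[i]'(hij.trans hj) - ints[j]|) := by
  unfold same_diff_ints
  simp only [List.any_eq_true, PySem.List.mem_pyRange_one, decide_eq_true_eq]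
  constructor
  · rintro ⟨i, ⟨hi0, hin⟩, j, ⟨hij, hjn⟩, h⟩
    have hj0 : (0:Int) ≤ j := by omega
    refine ⟨i.toNat, j.toNat, by omega, by omega, ?_⟩
    rw [PySem.List.pyGetD_eq_getElem ints 0 hi0 hin,
        PySem.List.pyGetD_eq_getElem ints 0 hj0 hjn] at h
    rw [Int.toNat_of_nonneg hj0, Int.toNat_of_nonneg hi0]
    exact h
  · rintro ⟨i, j, hj, hij, h⟩
    refine ⟨(i : Int), ⟨by omega, by omega⟩, (j : Int), ⟨by omega, by omega⟩, ?_⟩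
    rw [PySem.List.pyGetD_eq_getElem ints 0 (by omega) (by exact_mod_cast hij.trans hj),
        PySem.List.pyGetD_eq_getElem ints 0 (by omega) (by exact_mod_cast hj)]
    simpa using h

-- B's two duplicate tests as existentials over index pairs
lemma same_diff_ints_alt_eq_true_iff (ints : List Int) :
    same_diff_ints_alt ints = true ↔
      (∃ i j : Nat, ∃ hj : j < ints.length, ∃ hij : i < j,
         ints[i]'(hij.trans hj) - i = ints[j] - j) ∨
      (∃ i j : Nat, ∃ hj : j < ints.length, ∃ hij : i < j,
         ints[i]'(hij.trans hj) + i = ints[j] + j) := by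
  unfold same_diff_ints_alt
  simp only [Bool.or_eq_true, decide_eq_true_eq]
  have hlen : ∀ f : Int × Int → Int,
      ((PySem.List.enumerate ints).map f).length = ints.length := by
    intro f; simp [PySem.List.length_enumerate]
  constructor
  · rintro (h | h)
    · left
      rcases (not_nodup_iff_exists _).mp ((ofList_length_lt_iff _).mp h) with ⟨i, j, hj, hij, he⟩
      rw [hlen] at hj
      rw [getElem_map_enumerate _ ints 0 i (hij.trans hj) (by rw [hlen]; exact hij.trans hj),
          getElem_map_enumerate _ ints 0 j hj (by rw [hlen]; exact hj)] at he
      exact ⟨i, j, hj, hij, by simpa using he⟩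
    · right
      rcases (not_nodup_iff_exists _).mp ((ofList_length_lt_iff _).mp h) with ⟨i, j, hj, hij, he⟩
      rw [hlen] at hj
      rw [getElem_map_enumerate _ ints 0 i (hij.trans hj) (by rw [hlen]; exact hij.trans hj),
          getElem_map_enumerate _ ints 0 j hj (by rw [hlen]; exact hj)] at he
      exact ⟨i, j, hj, hij, by simpa using he⟩
  · rintro (⟨i, j, hj, hij, he⟩ | ⟨i, j, hj, hij, he⟩)
    · left
      apply (ofList_length_lt_iff _).mpr
      apply (not_nodup_iff_exists _).mpr
      refine ⟨i, j, by rw [hlen]; exact hj, hij, ?_⟩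
      rw [getElem_map_enumerate _ ints 0 i (hij.trans hj) (by rw [hlen]; exact hij.trans hj),
          getElem_map_enumerate _ ints 0 j hj (by rw [hlen]; exact hj)]
      simpa using he
    · right
      apply (ofList_length_lt_iff _).mpr
      apply (not_nodup_iff_exists _).mpr
      refine ⟨i, j, by rw [hlen]; exact hj, hij, ?_⟩
      rw [getElem_map_enumerate _ ints 0 i (hij.trans hj) (by rw [hlen]; exact hij.trans hj),
          getElem_map_enumerate _ ints 0 j hj (by rw [hlen]; exact hj)]
      simpa using he

-- ===== VERDICT (by name: the statement is the Claim_ definition above) =====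
theorem same_diff_ints_spec : Claim_equal_same_diff_ints := by
  intro ints _
  unfold Spec_same_diff_ints
  have h : same_diff_ints ints = true ↔ same_diff_ints_alt ints = true := by
    rw [same_diff_ints_eq_true_iff, same_diff_ints_alt_eq_true_iff]
    constructor
    · rintro ⟨i, j, hj, hij, h⟩
      rcases abs_cases (ints[i]'(hij.trans hj) - ints[j]) with ⟨he, _⟩ | ⟨he, _⟩
      · exact Or.inr ⟨i, j, hj, hij, by omega⟩
      · exact Or.inl ⟨i, j, hj, hij, by omega⟩
    · rintro (⟨i, j, hj, hij, h⟩ | ⟨i, j, hj, hij, h⟩)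
      · refine ⟨i, j, hj, hij, ?_⟩
        rcases abs_cases (ints[i]'(hij.trans hj) - ints[j]) with ⟨he, _⟩ | ⟨he, _⟩ <;> omega
      · refine ⟨i, j, hj, hij, ?_⟩
        rcases abs_cases (ints[i]'(hij.trans hj) - ints[j]) with ⟨he, _⟩ | ⟨he, _⟩ <;> omega
    
  cases hA : same_diff_ints ints <;> cases hB : same_diff_ints_alt ints <;> simp_all
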